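-- pv_equiv track=rewrite | github.com/Kchilala/Beer-world | app/data_exploration.py | get_state_style_count
-- ===== SOURCE A (Python) =====
-- def get_state_style_count(dataset, state: str)-> dict:
--     """
--     This function returns each styles of beer state produces, and how many beers of each style.
--     :param dataset:given the data (as returned by the read dataset function) and a state.
--     :return:returns a dictionary where each style name is a key with the count as its value.
--     """
--     # Initialize an empty dictionary to store beer style counts
--     style_counts = {}
--     # Iterate through the dataset
--     for row in dataset:
--         if row['state'] == state:
--             # Check if the current row's state matches the specified state
--             if row["style_name"] not in style_counts:
--                 style_counts[row["style_name"]] = 1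
--             # If the style is not in the dictionary, add it with a count of 1
--             # If the style is already in the dictionary, increment its count by 1
--             elif row["style_name"] in style_counts:
--                 style_counts[row["style_name"]] += 1
--         # If the row's state doesn't match the specified state, ensure the style is in the dictionary
--         # If it's not, add it with a count of 0
--         if row["style_name"] not in style_counts:
--             style_counts[row["style_name"]] = 0
--
--     return style_counts
-- ===== SOURCE B (Python) =====
-- def get_state_style_count(dataset, state: str) -> dict:
--     # Group-by formulation: collect the distinct styles in first-appearance
--     # order, then count each style's matching rows with its own scan.
--     styles = []
--     for row in dataset:
--         if row['style_name'] not in styles: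
--             styles.append(row['style_name'])
--     return {s: sum(1 for row in dataset
--                    if row['state'] == state and row['style_name'] == s)
--             for s in styles}
-- ===== Notes on version B (the rewrite author's own statement) =====
-- stated objective: alternative
-- what changed: A's single-pass dict counting (insert-1/increment/ensure-0 per row) is replaced by a group-by: a dedup pass collecting the distinct styles in first-appearance order, then an independent counting scan per style; correct because A's key order is exactly first appearance and each value is the number of matching rows with that style.
import Mathlib
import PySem

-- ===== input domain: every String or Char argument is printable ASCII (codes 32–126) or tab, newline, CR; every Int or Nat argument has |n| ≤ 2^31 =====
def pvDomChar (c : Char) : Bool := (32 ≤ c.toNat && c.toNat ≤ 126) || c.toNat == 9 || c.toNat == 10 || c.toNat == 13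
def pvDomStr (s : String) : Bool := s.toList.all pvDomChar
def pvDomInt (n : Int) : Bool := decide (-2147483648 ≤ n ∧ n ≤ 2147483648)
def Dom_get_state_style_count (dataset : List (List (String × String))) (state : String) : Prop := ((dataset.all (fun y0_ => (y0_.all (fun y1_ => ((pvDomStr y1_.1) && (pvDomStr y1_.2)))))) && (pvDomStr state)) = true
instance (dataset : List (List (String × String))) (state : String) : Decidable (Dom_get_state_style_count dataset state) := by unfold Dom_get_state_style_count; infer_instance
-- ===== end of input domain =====

-- B replaces A's single-pass dict counting by a group-by: a dedup pass collecting the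
-- distinct styles in first-appearance order, then one counting scan per style (objective: alternative).

-- row[k]; Pre_ guarantees the key is present, so the "" default is never the Python's KeyError
def pvRowGet (row : List (String × String)) (k : String) : String :=
  (PySem.Dict.mk row).getD k ""

-- ===== PORT A =====
-- body of A's loop, step for step
def pvStepA (state : String) (sc : PySem.Dict String Int) (row : List (String × String)) :
    PySem.Dict String Int :=
  let sn := pvRowGet row "style_name"
  let sc :=
    if pvRowGet row "state" = state then
      if sc.contains sn = false then sc.insert sn 1
      else if sc.contains sn then sc.insert sn (sc.getD sn 0 + 1)
      else sc
    else sc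
  if sc.contains sn = false then sc.insert sn 0 else sc

def get_state_style_count (dataset : List (List (String × String))) (state : String) :
    List (String × Int) :=
  (dataset.foldl (pvStepA state) PySem.Dict.empty).items

-- ===== PORT B =====
-- first pass: styles.append(row['style_name']) if not already collected
def pvCollect (styles : List String) (row : List (String × String)) : List String :=
  if pvRowGet row "style_name" ∈ styles then styles
  else styles ++ [pvRowGet row "style_name"]

-- sum(1 for row in dataset if row['state'] == state and row['style_name'] == s)
def pvCntStep (state s : String) (n : Int) (row : List (String × String)) : Int :=
  if pvRowGet row "state" = state ∧ pvRowGet row "style_name" = s then n + 1 else n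

-- the dict comprehension {s: sum(...) for s in styles}
def get_state_style_count_alt (dataset : List (List (String × String))) (state : String) :
    List (String × Int) :=
  ((dataset.foldl pvCollect []).foldl
    (fun d s => d.insert s (dataset.foldl (pvCntStep state s) 0)) PySem.Dict.empty).items

-- ===== PRECONDITION & SPEC =====
-- Pre_ excludes exactly the rows on which the Python A raises KeyError: a row without a
-- 'state' or 'style_name' key.
def Pre_get_state_style_count (dataset : List (List (String × String))) (state : String) : Prop :=
  (dataset.all (fun row =>
    (PySem.Dict.mk row).contains "state" && (PySem.Dict.mk row).contains "style_name")) = true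

instance (dataset : List (List (String × String))) (state : String) :
    Decidable (Pre_get_state_style_count dataset state) := by
  unfold Pre_get_state_style_count; infer_instance

def pvWitness_get_state_style_count : (List (List (String × String))) × String :=
  ([[("state", "TX"), ("style_name", "ale")], [("state", "CA"), ("style_name", "stout")]], "TX")

def Spec_get_state_style_count (dataset : List (List (String × String))) (state : String)
    (out : List (String × Int)) : Prop := out = get_state_style_count_alt dataset state
instance (dataset : List (List (String × String))) (state : String) (out : List (String × Int)) :
    Decidable (Spec_get_state_style_count dataset state out) := by
  unfold Spec_get_state_style_count; infer_instance

-- ===== CLAIM (what is proved, stated in full; the proofs are below) =====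
def Claim_equal_get_state_style_count : Prop :=
  ∀ (dataset : List (List (String × String))) (state : String),
    Dom_get_state_style_count dataset state → Pre_get_state_style_count dataset state →
    Spec_get_state_style_count dataset state (get_state_style_count dataset state)

-- ===== LEMMAS AND PROOFS =====

-- the dedup pass keeps the style list Nodup
lemma nodup_collect (rs : List (List (String × String))) :
    ∀ (K : List String), K.Nodup → (rs.foldl pvCollect K).Nodup := by
  induction rs with
  | nil => intro K hK; exact hK
  | cons r rs ih =>
    intro K hK
    simp only [List.foldl_cons]
    apply ih
    unfold pvCollect
    split
    · exact hK
    · rename_i hmem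
      have hall : ∀ a ∈ K, ¬a = pvRowGet r "style_name" := fun a ha h => hmem (h ▸ ha)
      simp [List.nodup_append, hK]
      exact hall

-- the counting fold shifts out of its accumulator
lemma cntStep_shift (state s : String) (rs : List (List (String × String))) :
    ∀ (n : Int), rs.foldl (pvCntStep state s) n = n + rs.foldl (pvCntStep state s) 0 := by
  induction rs with
  | nil => intro n; simp
  | cons r rs ih =>
    intro n
    simp only [List.foldl_cons]
    rw [ih (pvCntStep state s n r), ih (pvCntStep state s 0 r)]
    unfold pvCntStep
    split_ifs <;> omega

-- main invariant: A's loop over a dict whose items are K.map (s, g s) produces the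
-- group-by table over the extended key list
lemma stepA_items (state : String) (rs : List (List (String × String))) :
    ∀ (K : List String) (g : String → Int) (c : PySem.Dict String Int),
      K.Nodup → c.items = K.map (fun s => (s, g s)) →
      (rs.foldl (pvStepA state) c).items =
        (rs.foldl pvCollect K).map
          (fun s => (s, (if s ∈ K then g s else 0) + rs.foldl (pvCntStep state s) 0)) := by
  induction rs with
  | nil =>
    intro K g c _ hc
    simp only [List.foldl_nil]
    rw [hc]
    apply List.map_congr_left
    intro s hs
    simp [hs]
  | cons r rs ih =>
    intro K g c hK hc
    have hkeys : c.keys = K := by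
      simp [PySem.Dict.keys, hc, Function.comp_def]
    have hknd : c.keys.Nodup := by rw [hkeys]; exact hK
    simp only [List.foldl_cons]
    by_cases hmem : pvRowGet r "style_name" ∈ K
    · have hcont : c.contains (pvRowGet r "style_name") = true := by
        rw [PySem.Dict.contains_eq_decide_mem_keys, hkeys]; simpa
      have hcol : pvCollect K r = K := by unfold pvCollect; simp [hmem]
      by_cases hm : pvRowGet r "state" = state
      · -- matching row, style already present: overwrite in place with g sn + 1
        have hgd : c.getD (pvRowGet r "style_name") 0 = g (pvRowGet r "style_name") := by
          exact PySem.Dict.getD_of_mem_items c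
            (by rw [hc]; exact List.mem_map.mpr ⟨_, hmem, rfl⟩) hknd 0
        have hstep : pvStepA state c r =
            c.insert (pvRowGet r "style_name") (g (pvRowGet r "style_name") + 1) := by
          unfold pvStepA
          simp [hm, hcont, PySem.Dict.contains_insert_self, hgd]
        have hitems : (c.insert (pvRowGet r "style_name") (g (pvRowGet r "style_name") + 1)).items
            = K.map (fun s => (s, (fun s => if s = pvRowGet r "style_name"
                then g (pvRowGet r "style_name") + 1 else g s) s)) := by
          rw [PySem.Dict.items_insert_of_contains _ _ hcont, hc, List.map_map]
          apply List.map_congr_left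
          intro s _
          by_cases hs : s = pvRowGet r "style_name" <;> simp [hs]
        rw [hstep, ih K _ _ hK hitems, hcol]
        apply List.map_congr_left
        intro s _
        have hcnt : pvCntStep state s 0 r =
            if pvRowGet r "style_name" = s then 1 else 0 := by
          unfold pvCntStep; simp [hm]
        rw [cntStep_shift state s rs (pvCntStep state s 0 r), hcnt]
        by_cases hs : pvRowGet r "style_name" = s
        · subst hs; simp [hmem]; ring
        · have hs' : ¬ s = pvRowGet r "style_name" := fun h => hs h.symm
          simp [hs, hs']
      · -- non-matching row, style already present: no change at all
        have hstep : pvStepA state c r = c := by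
          unfold pvStepA
          simp [hm, hcont]
        rw [hstep, ih K g c hK hc, hcol]
        apply List.map_congr_left
        intro s _
        have hcnt : pvCntStep state s 0 r = 0 := by unfold pvCntStep; simp [hm]
        rw [cntStep_shift state s rs (pvCntStep state s 0 r), hcnt]
        simp
    · have hcont : c.contains (pvRowGet r "style_name") = false := by
        rw [PySem.Dict.contains_eq_decide_mem_keys, hkeys]; simpa
      have hcol : pvCollect K r = K ++ [pvRowGet r "style_name"] := by
        unfold pvCollect; simp [hmem]
      have hnd' : (K ++ [pvRowGet r "style_name"]).Nodup := by
        have hall : ∀ a ∈ K, ¬a = pvRowGet r "style_name" := fun a ha h => hmem (h ▸ ha)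
        simp [List.nodup_append, hK]
        exact hall
      by_cases hm : pvRowGet r "state" = state
      · -- matching row, new style: append (sn, 1)
        have hstep : pvStepA state c r = c.insert (pvRowGet r "style_name") 1 := by
          unfold pvStepA
          simp [hm, hcont, PySem.Dict.contains_insert_self]
        have hitems : (c.insert (pvRowGet r "style_name") 1).items
            = (K ++ [pvRowGet r "style_name"]).map (fun s => (s,
                (fun s => if s = pvRowGet r "style_name" then (1 : Int) else g s) s)) := by
          rw [PySem.Dict.items_insert_of_not_contains _ _ hcont, hc, List.map_append]
          congr 1
          · apply List.map_congr_left
            intro s hs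
            have : s ≠ pvRowGet r "style_name" := fun h => hmem (h ▸ hs)
            simp [this]
          · simp
        rw [hstep, ih _ _ _ hnd' hitems, hcol]
        apply List.map_congr_left
        intro s _
        have hcnt : pvCntStep state s 0 r =
            if pvRowGet r "style_name" = s then 1 else 0 := by
          unfold pvCntStep; simp [hm]
        rw [cntStep_shift state s rs (pvCntStep state s 0 r), hcnt]
        by_cases hs : pvRowGet r "style_name" = s
        · subst hs; simp [hmem]
        · have hs' : ¬ s = pvRowGet r "style_name" := fun h => hs h.symm
          by_cases hsK : s ∈ K <;> simp [hsK, hs, hs']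
      · -- non-matching row, new style: append (sn, 0)
        have hstep : pvStepA state c r = c.insert (pvRowGet r "style_name") 0 := by
          unfold pvStepA
          simp [hm, hcont]
        have hitems : (c.insert (pvRowGet r "style_name") 0).items
            = (K ++ [pvRowGet r "style_name"]).map (fun s => (s,
                (fun s => if s = pvRowGet r "style_name" then (0 : Int) else g s) s)) := by
          rw [PySem.Dict.items_insert_of_not_contains _ _ hcont, hc, List.map_append]
          congr 1
          · apply List.map_congr_left
            intro s hs
            have : s ≠ pvRowGet r "style_name" := fun h => hmem (h ▸ hs)
            simp [this]
          · simp
        rw [hstep, ih _ _ _ hnd' hitems, hcol]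
        apply List.map_congr_left
        intro s _
        have hcnt : pvCntStep state s 0 r = 0 := by unfold pvCntStep; simp [hm]
        rw [cntStep_shift state s rs (pvCntStep state s 0 r), hcnt]
        by_cases hs : pvRowGet r "style_name" = s
        · subst hs; simp [hmem]
        · have hs' : ¬ s = pvRowGet r "style_name" := fun h => hs h.symm
          by_cases hsK : s ∈ K <;> simp [hsK, hs, hs']

-- a fold of inserts at fresh distinct keys appends exactly the map of pairs
lemma items_build (f : String → Int) (styles : List String) :
    ∀ (d : PySem.Dict String Int), styles.Nodup → (∀ s ∈ styles, d.contains s = false) →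
      (styles.foldl (fun d s => d.insert s (f s)) d).items =
        d.items ++ styles.map (fun s => (s, f s)) := by
  induction styles with
  | nil => intro d _ _; simp
  | cons s ss ih =>
    intro d hnd hfresh
    simp only [List.foldl_cons, List.map_cons]
    rw [ih (d.insert s (f s)) (List.Nodup.of_cons hnd)
        (fun t ht => by
          rw [PySem.Dict.contains_insert]
          have hts : (t == s) = false := by
            simp only [beq_eq_false_iff_ne, ne_eq]
            exact fun h => (List.nodup_cons.mp hnd).1 (h ▸ ht)
          rw [hts, hfresh t (List.mem_cons_of_mem s ht)]; rfl),
      PySem.Dict.items_insert_of_not_contains _ _ (hfresh s (List.mem_cons_self))]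
    simp

-- B's dict comprehension over the (fresh, distinct) styles is just the map of pairs
lemma alt_items (dataset : List (List (String × String))) (state : String) :
    get_state_style_count_alt dataset state =
      (dataset.foldl pvCollect []).map
        (fun s => (s, dataset.foldl (pvCntStep state s) 0)) := by
  unfold get_state_style_count_alt
  rw [items_build _ _ PySem.Dict.empty (nodup_collect dataset [] List.nodup_nil)
      (fun s _ => PySem.Dict.contains_empty s)]
  rfl

-- ===== VERDICT (by name: the statement is the Claim_ definition above) =====
theorem get_state_style_count_spec : Claim_equal_get_state_style_count := by
  intro dataset state _ _
  unfold Spec_get_state_style_count get_state_style_count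
  rw [alt_items,
      stepA_items state dataset [] (fun _ => 0) PySem.Dict.empty List.nodup_nil rfl]
  simp
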